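-- pv_equiv track=rewrite | github.com/andivk01/exam24feb | esame.py | hourly_trend_changes
-- ===== SOURCE A (Python) =====
-- def hourly_trend_changes(time_series):
--     trend = [] # lista tornata dalla funzione, contiene le inversioni
--     idx = 0 # indice per scorrere la lista 'time_series'
--     idx_trending = -1 # indice della lista 'trend', e' di fatto l'ora (nella PRIMA ora ci sono state tot inversioni... nella SECONDA...)
--     prec_hour_considered = -1 # ora considerata ad un'iterazione precedente
--     increasing = False # boolean per tenere conto della crescenza della temperatura
--
--     if len(time_series) == 1: # con un solo dato abbiamo zero inversioni
--         return [0]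
--
--     while(idx < len(time_series)-1): # ciclo fino a quando non finisco i dati
--         hour = (time_series[idx+1][0])//3600 # prendo l'ora a partire dal epoch
--         if(prec_hour_considered != hour): # controllo se ho cambiato ora di riferimento delle temperature
--             idx_trending += 1 # aumento l'indice (l'ora a cui si riferiscono le inversioni) della lista 'trend'
--             trend.append(0) # aggiungo zero (ovvero il numero delle inversioni) alla lista
--         prec_hour_considered = hour
--
--         if(time_series[idx][1] > time_series[idx+1][1]): # controllo se la temperatura scende
--             if(increasing and idx != 0): # controllo se ho subito un'inversione del trend
--                 trend[idx_trending] += 1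
--             increasing = False # la temperatura non sta salendo piu'
--         if(time_series[idx][1] < time_series[idx+1][1]): # controllo se la temperatura sale
--             if(not increasing and idx != 0):
--                 trend[idx_trending] += 1
--             increasing = True
--
--         idx += 1
--
--     return trend
-- ===== SOURCE B (Python) =====
-- def hourly_trend_changes(time_series):
--     n = len(time_series)
--     if n == 1:
--         return [0]
--     # pass 1: 0/1 inversion flag per consecutive transition
--     flags = []
--     increasing = False
--     for i in range(n - 1):
--         prev_t = time_series[i][1]
--         next_t = time_series[i + 1][1]
--         f = 0
--         if prev_t != next_t:
--             up = next_t > prev_t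
--             if i > 0 and up != increasing:
--                 f = 1
--             increasing = up
--         flags.append(f)
--     # pass 2: hour bucket of each transition
--     hours = [time_series[i + 1][0] // 3600 for i in range(n - 1)]
--     # pass 3: sum flags over consecutive runs of equal hours, built back-to-front
--     result = []
--     for i in reversed(range(n - 1)):
--         if i + 1 <= n - 2 and hours[i + 1] == hours[i]:
--             result[0] += flags[i]
--         else:
--             result.insert(0, flags[i])
--     return result
-- ===== Notes on version B (the rewrite author's own statement) =====
-- stated objective: alternative
-- what changed: A's single fused loop carrying four pieces of mutable state (trend list, trend index, previous-hour sentinel, direction) is replaced by three independent passes: a flags pass marking each transition 0/1, an hours pass, and a run-grouping pass that sums flags over consecutive equal-hour runs building the result back-to-front.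
-- outside the precondition, e.g. on hourly_trend_changes([(-3600, 10), (-1, 20)]): A returns [], B returns [0]
import Mathlib
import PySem

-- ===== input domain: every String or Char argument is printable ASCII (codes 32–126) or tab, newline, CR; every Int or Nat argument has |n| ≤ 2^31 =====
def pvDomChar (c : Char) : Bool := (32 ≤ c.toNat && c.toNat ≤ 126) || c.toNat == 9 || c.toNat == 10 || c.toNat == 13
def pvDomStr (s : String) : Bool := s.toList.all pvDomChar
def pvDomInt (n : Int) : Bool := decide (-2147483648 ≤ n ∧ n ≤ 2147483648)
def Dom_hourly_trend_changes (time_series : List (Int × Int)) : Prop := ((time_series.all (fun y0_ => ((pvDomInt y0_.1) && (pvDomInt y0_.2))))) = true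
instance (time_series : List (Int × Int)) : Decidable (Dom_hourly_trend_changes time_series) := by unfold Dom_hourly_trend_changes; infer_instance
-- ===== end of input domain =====

-- B replaces A's fused single loop (four pieces of mutable state) by three independent passes:
-- per-transition inversion flags, per-transition hour buckets, and a run-grouping pass built back-to-front.

-- ===== PORT A =====
-- trend[idx_trending] += 1. Inside Pre_ the index is always in range; on an out-of-range
-- index Python raises IndexError (those inputs are excluded by Pre_), here the list is returned unchanged.
def pyIncAt (tr : List Int) (i : Int) : List Int :=
  if 0 ≤ i ∧ i < (tr.length : Int) then tr.set i.toNat (tr[i.toNat]! + 1) else tr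

-- the while loop of A: state (idx, trend, idx_trending, prec_hour_considered, increasing);
-- it iterates while idx < len-1, reading time_series[idx] and time_series[idx+1]
def aLoop : List (Int × Int) → Nat → List Int → Int → Int → Bool → List Int
  | a :: b :: rest, idx, trend0, idxt0, prec, inc0 =>
    let hour := PySem.Int.floordiv b.1 3600
    let trend1 := if prec ≠ hour then trend0 ++ [(0 : Int)] else trend0
    let idxt := if prec ≠ hour then idxt0 + 1 else idxt0
    let trend2 := if a.2 > b.2 then (if inc0 ∧ idx ≠ 0 then pyIncAt trend1 idxt else trend1) else trend1
    let inc1 := if a.2 > b.2 then false else inc0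
    let trend3 := if a.2 < b.2 then (if (¬ inc1) ∧ idx ≠ 0 then pyIncAt trend2 idxt else trend2) else trend2
    let inc2 := if a.2 < b.2 then true else inc1
    aLoop (b :: rest) (idx + 1) trend3 idxt hour inc2
  | _, _, trend0, _, _, _ => trend0

def hourly_trend_changes (time_series : List (Int × Int)) : List Int :=
  if time_series.length = 1 then [0]
  else aLoop time_series 0 [] (-1) (-1) false

-- ===== PORT B =====
-- pass 1 of Source B: the flags list (one 0/1 per transition), carrying `increasing`
def flagsLoop : List (Int × Int) → Nat → Bool → List Int
  | a :: b :: rest, i, inc =>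
    (if a.2 ≠ b.2 then
      (if 0 < i ∧ (decide (a.2 < b.2)) ≠ inc then (1 : Int) else 0)
     else 0)
    :: flagsLoop (b :: rest) (i + 1) (if a.2 ≠ b.2 then decide (a.2 < b.2) else inc)
  | _, _, _ => []

-- pass 2 of Source B: hours[i] = time_series[i+1][0] // 3600
def hoursOf : List (Int × Int) → List Int
  | _ :: b :: rest => PySem.Int.floordiv b.1 3600 :: hoursOf (b :: rest)
  | _ => []

-- pass 3 of Source B: the reversed-index loop; at step i the recursive result is the grouping of
-- transitions i+1.., and flags[i] is merged into its head iff hours[i+1] == hours[i]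
def groupRuns : List Int → List Int → List Int
  | h :: hs, f :: fs =>
    if hs.head? = some h then
      (match groupRuns hs fs with
       | x :: xs => (f + x) :: xs
       | [] => [f])
    else f :: groupRuns hs fs
  | _, _ => []

def hourly_trend_changes_alt (time_series : List (Int × Int)) : List Int :=
  if time_series.length = 1 then [0]
  else groupRuns (hoursOf time_series) (flagsLoop time_series 0 false)

-- ===== PRECONDITION & SPEC =====
-- Pre_ excludes series whose second timestamp lies in [-3600, -1]: that first hour equals A's
-- sentinel -1, so A never opens the first bucket — it raises IndexError on any inversion in that
-- initial run, and otherwise returns a list missing the first hour's bucket (B returns it).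
def Pre_hourly_trend_changes (time_series : List (Int × Int)) : Prop :=
  (((time_series.drop 1).head?.map (fun b => PySem.Int.floordiv b.1 3600)).getD 0) ≠ -1
instance (time_series : List (Int × Int)) : Decidable (Pre_hourly_trend_changes time_series) := by
  unfold Pre_hourly_trend_changes; infer_instance

def pvWitness_hourly_trend_changes : (List (Int × Int)) := [(0, 5), (3700, 3), (3800, 7)]

def Spec_hourly_trend_changes (time_series : List (Int × Int)) (out : List Int) : Prop := out = hourly_trend_changes_alt time_series
instance (time_series : List (Int × Int)) (out : List Int) : Decidable (Spec_hourly_trend_changes time_series out) := by unfold Spec_hourly_trend_changes; infer_instance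

-- ===== CLAIM (what is proved, stated in full; the proofs are below) =====
def Claim_equal_hourly_trend_changes : Prop := ∀ (time_series : List (Int × Int)), Dom_hourly_trend_changes time_series → Pre_hourly_trend_changes time_series → Spec_hourly_trend_changes time_series (hourly_trend_changes time_series)

-- ===== LEMMAS AND PROOFS =====

theorem pyIncAt_append_singleton (ts : List Int) (t : Int) :
    pyIncAt (ts ++ [t]) (ts.length : Int) = ts ++ [t + 1] := by
  unfold pyIncAt
  rw [if_pos (by constructor <;> simp)]
  rw [show ((ts.length : Int)).toNat = ts.length by simp, List.getElem!_eq_getElem?_getD]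
  simp

theorem pyIncAt_append_pair (ts : List Int) (t u : Int) :
    pyIncAt (ts ++ [t, u]) ((ts.length : Int) + 1) = ts ++ [t, u + 1] := by
  have h := pyIncAt_append_singleton (ts ++ [t]) u
  simpa using h

-- the flag and direction produced by one iteration of B's first pass, once i > 0
theorem flagsLoop_cons (a b : Int × Int) (rest : List (Int × Int)) (i : Nat) (inc : Bool)
    (hi : i ≠ 0) :
    flagsLoop (a :: b :: rest) i inc =
      (if a.2 ≠ b.2 ∧ (decide (a.2 < b.2)) ≠ inc then (1 : Int) else 0)
        :: flagsLoop (b :: rest) (i + 1) (if a.2 ≠ b.2 then decide (a.2 < b.2) else inc) := by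
  have h0 : 0 < i := Nat.pos_of_ne_zero hi
  simp only [flagsLoop, h0, true_and]
  by_cases hne : a.2 ≠ b.2 <;> simp [hne]

-- one iteration of A's loop, once idx ≠ 0 and the trend index points at the last bucket
theorem aLoop_step (a b : Int × Int) (rest : List (Int × Int)) (idx : Nat)
    (ts0 : List Int) (t prec : Int) (inc : Bool) (hidx : idx ≠ 0) :
    aLoop (a :: b :: rest) idx (ts0 ++ [t]) (ts0.length : Int) prec inc =
      (if prec = PySem.Int.floordiv b.1 3600
       then aLoop (b :: rest) (idx + 1)
              (ts0 ++ [t + (if a.2 ≠ b.2 ∧ (decide (a.2 < b.2)) ≠ inc then 1 else 0)])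
              (ts0.length : Int) (PySem.Int.floordiv b.1 3600)
              (if a.2 ≠ b.2 then decide (a.2 < b.2) else inc)
       else aLoop (b :: rest) (idx + 1)
              ((ts0 ++ [t]) ++ [(if a.2 ≠ b.2 ∧ (decide (a.2 < b.2)) ≠ inc then 1 else 0)])
              ((ts0.length : Int) + 1) (PySem.Int.floordiv b.1 3600)
              (if a.2 ≠ b.2 then decide (a.2 < b.2) else inc)) := by
  show aLoop (a :: b :: rest) idx (ts0 ++ [t]) (ts0.length : Int) prec inc = _
  simp only [aLoop]
  by_cases hpe : prec = PySem.Int.floordiv b.1 3600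
  · simp only [hpe, ne_eq, not_true_eq_false, if_false, if_pos rfl, ite_not]
    rcases lt_trichotomy a.2 b.2 with hlt | heq | hgt
    · have h1 : ¬ a.2 > b.2 := by omega
      have h2 : a.2 ≠ b.2 := by omega
      by_cases hinc : inc
      · simp [h1, hlt, h2, hinc]
      · simp [h1, hlt, h2, hinc, hidx, pyIncAt_append_singleton]
    · simp [heq]
    · have h1 : a.2 > b.2 := hgt
      have h2 : ¬ a.2 < b.2 := by omega
      have h3 : a.2 ≠ b.2 := by omega
      by_cases hinc : inc
      · simp [h1, h2, h3, hinc, hidx, pyIncAt_append_singleton]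
      · simp [h1, h2, h3, hinc]
  · have hlen : ((ts0 ++ [t]).length : Int) = (ts0.length : Int) + 1 := by simp
    simp only [hpe, ne_eq, not_false_eq_true, if_true, if_neg hpe, ite_not]
    rcases lt_trichotomy a.2 b.2 with hlt | heq | hgt
    · have h1 : ¬ a.2 > b.2 := by omega
      have h2 : a.2 ≠ b.2 := by omega
      by_cases hinc : inc
      · simp [h1, hlt, h2, hinc]
      · simp [h1, hlt, h2, hinc, hidx, pyIncAt_append_pair]
    · simp [heq]
    · have h1 : a.2 > b.2 := hgt
      have h2 : ¬ a.2 < b.2 := by omega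
      have h3 : a.2 ≠ b.2 := by omega
      by_cases hinc : inc
      · simp [h1, h2, h3, hinc, hidx, pyIncAt_append_pair]
      · simp [h1, h2, h3, hinc]

-- groupRuns on matching cons inputs is nonempty
theorem groupRuns_ne_nil (h : Int) (hs : List Int) (f : Int) (fs : List Int) :
    groupRuns (h :: hs) (f :: fs) ≠ [] := by
  unfold groupRuns
  cases hgr : groupRuns hs fs <;> split_ifs <;> simp

-- head-merge: add t to the head bucket of a grouping
def bump (t : Int) : List Int → List Int
  | x :: xs => (t + x) :: xs
  | [] => [t]

-- main simulation lemma: from any iteration with idx ≠ 0, A's loop extends the current trend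
-- (ts0 ++ [t], last index ts0.length) exactly by B's grouping of the remaining transitions,
-- merging into t when the first remaining hour equals prec.
theorem aLoop_eq (l : List (Int × Int)) :
    ∀ (a b : Int × Int) (ts0 : List Int) (t prec : Int) (inc : Bool) (idx : Nat), idx ≠ 0 →
    aLoop (a :: b :: l) idx (ts0 ++ [t]) (ts0.length : Int) prec inc =
      ts0 ++ (if prec = PySem.Int.floordiv b.1 3600
              then bump t (groupRuns (hoursOf (a :: b :: l)) (flagsLoop (a :: b :: l) idx inc))
              else t :: groupRuns (hoursOf (a :: b :: l)) (flagsLoop (a :: b :: l) idx inc)) := by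
  induction l with
  | nil =>
    intro a b ts0 t prec inc idx hidx
    rw [aLoop_step a b [] idx ts0 t prec inc hidx, flagsLoop_cons a b [] idx inc hidx]
    by_cases hpe : prec = PySem.Int.floordiv b.1 3600
    · rw [if_pos hpe, if_pos hpe]
      simp [aLoop, hoursOf, flagsLoop, groupRuns, bump]
    · rw [if_neg hpe, if_neg hpe]
      simp [aLoop, hoursOf, flagsLoop, groupRuns]
  | cons c l' ih =>
    intro a b ts0 t prec inc idx hidx
    rw [aLoop_step a b (c :: l') idx ts0 t prec inc hidx, flagsLoop_cons a b (c :: l') idx inc hidx]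
    set f : Int := if a.2 ≠ b.2 ∧ (decide (a.2 < b.2)) ≠ inc then 1 else 0 with hf
    set inc' : Bool := if a.2 ≠ b.2 then decide (a.2 < b.2) else inc with hinc'
    set R := groupRuns (hoursOf (b :: c :: l')) (flagsLoop (b :: c :: l') (idx + 1) inc') with hR
    have hRne : R ≠ [] := by
      rw [hR]
      simp only [hoursOf, flagsLoop]
      exact groupRuns_ne_nil _ _ _ _
    obtain ⟨x, xs, hxxs⟩ : ∃ x xs, R = x :: xs := by
      cases hc : R with
      | nil => exact absurd hc hRne
      | cons x xs => exact ⟨x, xs, rfl⟩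
    have hgr : groupRuns (hoursOf (a :: b :: c :: l')) (f :: flagsLoop (b :: c :: l') (idx + 1) inc') =
        if PySem.Int.floordiv b.1 3600 = PySem.Int.floordiv c.1 3600
        then (f + x) :: xs else f :: R := by
      show groupRuns (PySem.Int.floordiv b.1 3600 :: hoursOf (b :: c :: l')) _ = _
      rw [groupRuns]
      have hhead : (hoursOf (b :: c :: l')).head? = some (PySem.Int.floordiv c.1 3600) := by
        simp [hoursOf]
      rw [hhead]
      by_cases hbc : PySem.Int.floordiv b.1 3600 = PySem.Int.floordiv c.1 3600
      · rw [if_pos (by rw [hbc]), if_pos hbc, ← hR, hxxs]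
      · rw [if_neg (by simpa [eq_comm] using hbc), if_neg hbc, ← hR]
    by_cases hpe : prec = PySem.Int.floordiv b.1 3600
    · rw [if_pos hpe, if_pos hpe,
        ih b c ts0 (t + f) (PySem.Int.floordiv b.1 3600) inc' (idx + 1) (by omega), hgr, ← hR]
      by_cases hbc : PySem.Int.floordiv b.1 3600 = PySem.Int.floordiv c.1 3600
      · rw [if_pos hbc, if_pos hbc, hxxs]
        simp [bump, add_assoc]
      · rw [if_neg hbc, if_neg hbc]
        simp [bump]
    · rw [if_neg hpe, if_neg hpe,
        show ((ts0.length : Int) + 1) = (((ts0 ++ [t]).length : Int)) by simp,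
        ih b c (ts0 ++ [t]) f (PySem.Int.floordiv b.1 3600) inc' (idx + 1) (by omega), hgr, ← hR]
      by_cases hbc : PySem.Int.floordiv b.1 3600 = PySem.Int.floordiv c.1 3600
      · rw [if_pos hbc, if_pos hbc, hxxs]
        simp [bump]
      · rw [if_neg hbc, if_neg hbc]
        simp [bump]

-- ===== VERDICT (by name: the statement is the Claim_ definition above) =====
theorem hourly_trend_changes_spec : Claim_equal_hourly_trend_changes := by
  intro ts _ hpre
  unfold Spec_hourly_trend_changes hourly_trend_changes hourly_trend_changes_alt
  match ts with
  | [] => rfl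
  | [a] => rfl
  | a :: b :: rest =>
    have hlen : ¬ (a :: b :: rest).length = 1 := by simp
    rw [if_neg hlen, if_neg hlen]
    have hpre' : PySem.Int.floordiv b.1 3600 ≠ -1 := by
      simpa [Pre_hourly_trend_changes] using hpre
    -- first iteration: idx = 0, sentinel prec = -1 ≠ hour, no increments, bucket [0] opened
    have hinc2 : (if a.2 < b.2 then true else if a.2 > b.2 then false else false) = decide (a.2 < b.2) := by
      rcases lt_trichotomy a.2 b.2 with h | h | h
      · simp [h]
      · simp [h]
      · simp [show ¬ a.2 < b.2 by omega, show a.2 > b.2 by omega]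
    have hfirst : aLoop (a :: b :: rest) 0 [] (-1) (-1) false =
        aLoop (b :: rest) 1 [(0 : Int)] 0 (PySem.Int.floordiv b.1 3600) (decide (a.2 < b.2)) := by
      simp only [aLoop, eq_true (Ne.symm hpre'), if_true, ne_eq, not_true_eq_false, and_false,
        if_false, List.nil_append, neg_add_cancel, Bool.false_eq_true, false_and, ite_self, hinc2]
      simp
    rw [hfirst]
    -- B's first flag is 0 and its direction after transition 0 is a.2 < b.2
    have hflag0 : flagsLoop (a :: b :: rest) 0 false =
        (0 : Int) :: flagsLoop (b :: rest) 1 (decide (a.2 < b.2)) := by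
      by_cases hne : a.2 = b.2
      · simp [flagsLoop, hne]
      · simp [flagsLoop, hne]
    rw [hflag0]
    match rest with
    | [] => simp [aLoop, hoursOf, flagsLoop, groupRuns]
    | c :: rest' =>
      rw [show aLoop (b :: c :: rest') 1 [(0 : Int)] 0 (PySem.Int.floordiv b.1 3600) (decide (a.2 < b.2)) =
            aLoop (b :: c :: rest') 1 (([] : List Int) ++ [(0 : Int)]) ((List.length ([] : List Int) : Int))
              (PySem.Int.floordiv b.1 3600) (decide (a.2 < b.2)) from rfl,
        aLoop_eq rest' b c [] 0 (PySem.Int.floordiv b.1 3600) (decide (a.2 < b.2)) 1 one_ne_zero]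
      set R := groupRuns (hoursOf (b :: c :: rest')) (flagsLoop (b :: c :: rest') 1 (decide (a.2 < b.2))) with hR
      have hRne : R ≠ [] := by
        rw [hR]; simp only [hoursOf, flagsLoop]; exact groupRuns_ne_nil _ _ _ _
      obtain ⟨x, xs, hxxs⟩ : ∃ x xs, R = x :: xs := by
        cases hc : R with
        | nil => exact absurd hc hRne
        | cons x xs => exact ⟨x, xs, rfl⟩
      show _ = groupRuns (PySem.Int.floordiv b.1 3600 :: hoursOf (b :: c :: rest'))
          (0 :: flagsLoop (b :: c :: rest') 1 (decide (a.2 < b.2)))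
      rw [groupRuns]
      have hhead : (hoursOf (b :: c :: rest')).head? = some (PySem.Int.floordiv c.1 3600) := by
        simp [hoursOf]
      rw [hhead, ← hR]
      by_cases hbc : PySem.Int.floordiv b.1 3600 = PySem.Int.floordiv c.1 3600
      · rw [if_pos hbc, if_pos (by rw [hbc]), hxxs]
        simp [bump]
      · rw [if_neg hbc, if_neg (by simpa [eq_comm] using hbc)]
        simp [bump]
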